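-- pv_equiv track=rewrite | github.com/wilmurillo-ai/Design-Assistant | .skills/openclaw-skills/skills/yuangu260/kiwi-voice/kiwi/text_processing.py | remove_duplicate_prefixes
-- ===== SOURCE A (Python) =====
-- def remove_duplicate_prefixes(text: str) -> str:
--     """Remove duplicate prefix in a string (e.g. 'ПриПривет' -> 'Привет')."""
--     if len(text) < 4:
--         return text
--
--     for length in range(2, len(text) // 2 + 1):
--         prefix = text[:length]
--         if text.startswith(prefix + prefix):
--             pos = 0
--             while text[pos:pos + length] == prefix:
--                 pos += length
--             return text[pos - length:]
--
--     return text
-- ===== SOURCE B (Python) =====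
-- def remove_duplicate_prefixes(text: str) -> str:
--     """Remove duplicate prefix in a string (e.g. 'ПриПривет' -> 'Привет')."""
--     n = len(text)
--     for length in range(2, n // 2 + 1):
--         # r = length of the longest match between text and text[length:]
--         r = 0
--         while r + length < n and text[r] == text[r + length]:
--             r += 1
--         if r >= length:
--             return text[(r // length) * length:]
--     return text
-- ===== Notes on version B (the rewrite author's own statement) =====
-- stated objective: alternative
-- what changed: For each candidate length B computes the longest character-wise match r between text and text[length:] (a Z-value) and both detects the square prefix (r >= length) and strips it with arithmetic text[(r//length)*length:], replacing A's prefix+prefix startswith test and its block-by-block slice-comparison while loop.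
import Mathlib
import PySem

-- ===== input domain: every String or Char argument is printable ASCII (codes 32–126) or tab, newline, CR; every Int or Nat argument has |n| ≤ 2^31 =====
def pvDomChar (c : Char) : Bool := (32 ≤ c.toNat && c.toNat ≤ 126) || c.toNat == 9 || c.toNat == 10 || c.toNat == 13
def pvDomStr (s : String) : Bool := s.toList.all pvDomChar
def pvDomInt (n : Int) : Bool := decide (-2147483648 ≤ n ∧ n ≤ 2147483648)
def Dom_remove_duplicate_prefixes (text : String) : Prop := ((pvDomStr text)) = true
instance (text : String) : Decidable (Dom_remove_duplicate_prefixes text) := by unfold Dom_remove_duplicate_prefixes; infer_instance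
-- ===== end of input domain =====

-- B replaces A's prefix+prefix startswith test and block-by-block strip loop with one
-- character-wise longest-self-overlap computation per candidate length plus arithmetic
-- stripping (objective: alternative; same exact return value).

-- ===== PORT A =====
-- while text[pos:pos+length] == prefix: pos += length    (the 'p ≠ []' conjunct is a
-- totality guard only: A always calls this with |p| = length ≥ 2)
def pvAStrip (t p : List Char) (L pos : Nat) : Nat :=
  if h : p ≠ [] ∧ PySem.List.slice t (some (pos : Int)) (some ((pos : Int) + (L : Int))) = p then
    pvAStrip t p L (pos + L)
  else pos
termination_by t.length - pos
decreasing_by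
  rw [PySem.List.slice_natCast_add] at h
  have hL : 1 ≤ L := by
    rcases Nat.eq_zero_or_pos L with h0 | h1
    · exact absurd h.2 (by simp [h0, Ne.symm h.1])
    · exact h1
  have hpos : pos < t.length := by
    by_contra hc
    exact h.1 (h.2 ▸ by simp [List.drop_eq_nil_of_le (Nat.le_of_not_lt hc)])
  omega

-- for length in range(2, len(text) // 2 + 1): …   (nonnegative ints: '// 2' is Nat division, exact)
def pvASearch (t : List Char) (L : Nat) : List Char :=
  if _h : L < t.length / 2 + 1 then
    let p := PySem.List.slice t none (some (L : Int))          -- prefix = text[:length]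
    if PySem.Chars.startswith t (p ++ p) then                  -- text.startswith(prefix + prefix)
      let pos := pvAStrip t p L 0
      PySem.List.slice t (some ((pos : Int) - (L : Int))) none -- return text[pos - length:]
    else pvASearch t (L + 1)
  else t
termination_by t.length / 2 + 1 - L

def remove_duplicate_prefixes (text : String) : String :=
  let t := text.toList
  if PySem.Chars.len t < 4 then text
  else String.ofList (pvASearch t 2)

-- ===== PORT B =====
-- r = 0; while r + length < n and text[r] == text[r + length]: r += 1
def pvBExt (t : List Char) (L r : Nat) : Nat :=
  if h : r + L < t.length ∧
      PySem.List.pyGet? t (r : Int) = PySem.List.pyGet? t ((r : Int) + (L : Int)) then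
    pvBExt t L (r + 1)
  else r
termination_by t.length - r
decreasing_by omega

-- for length in range(2, n // 2 + 1): …
def pvBSearch (t : List Char) (L : Nat) : List Char :=
  if _h : L < t.length / 2 + 1 then
    let r := pvBExt t L 0
    if L ≤ r then
      PySem.List.slice t (some ((r / L * L : Nat) : Int)) none -- return text[(r // length) * length:]
    else pvBSearch t (L + 1)
  else t
termination_by t.length / 2 + 1 - L

def remove_duplicate_prefixes_alt (text : String) : String :=
  String.ofList (pvBSearch text.toList 2)

-- ===== PRECONDITION & SPEC =====
def Spec_remove_duplicate_prefixes (text : String) (out : String) : Prop := out = remove_duplicate_prefixes_alt text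
instance (text : String) (out : String) : Decidable (Spec_remove_duplicate_prefixes text out) := by unfold Spec_remove_duplicate_prefixes; infer_instance

-- ===== CLAIM (what is proved, stated in full; the proofs are below) =====
def Claim_equal_remove_duplicate_prefixes : Prop := ∀ (text : String), Dom_remove_duplicate_prefixes text → Spec_remove_duplicate_prefixes text (remove_duplicate_prefixes text)

-- ===== LEMMAS AND PROOFS =====

-- The continuation condition of B's inner while loop, at index i
def pvCond (t : List Char) (L i : Nat) : Prop :=
  i + L < t.length ∧ t[i]? = t[i + L]?

lemma pvCond_iff (t : List Char) (L i : Nat) :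
    (i + L < t.length ∧
      PySem.List.pyGet? t (i : Int) = PySem.List.pyGet? t ((i : Int) + (L : Int))) ↔ pvCond t L i := by
  rw [show ((i : Int) + (L : Int)) = ((i + L : Nat) : Int) by push_cast; ring,
     PySem.List.pyGet?_natCast, PySem.List.pyGet?_natCast]
  rfl

lemma pvBExt_spec (t : List Char) (L r : Nat) :
    r ≤ pvBExt t L r ∧ (∀ i, r ≤ i → i < pvBExt t L r → pvCond t L i) ∧
      ¬ pvCond t L (pvBExt t L r) := by
  fun_induction pvBExt t L r with
  | case1 r h ih =>
    refine ⟨le_trans (by omega) ih.1, fun i h1 h2 => ?_, ih.2.2⟩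
    rcases Nat.lt_or_ge i (r + 1) with hlt | hge
    · have hi : i = r := by omega
      subst hi; exact (pvCond_iff t L i).mp h
    · exact ih.2.1 i hge h2
  | case2 r h =>
    exact ⟨le_refl _, fun i h1 h2 => absurd h1 (by omega), fun hc => h ((pvCond_iff t L r).mpr hc)⟩

lemma pvPeriod (t : List Char) (L r : Nat) (hL : 1 ≤ L)
    (hext : ∀ i, i < r → pvCond t L i) :
    ∀ m, m < r + L → t[m]? = t[m % L]? := by
  intro m
  induction m using Nat.strong_induction_on with
  | _ m ih =>
    intro hm
    by_cases hmL : m < L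
    · rw [Nat.mod_eq_of_lt hmL]
    · have hL' : L ≤ m := Nat.le_of_not_lt hmL
      have h1 : m - L < r := by omega
      have h2 := (hext (m - L) h1).2
      rw [Nat.sub_add_cancel hL'] at h2
      rw [← h2, ih (m - L) (by omega) (by omega), Nat.mod_eq_sub_mod hL']

lemma pvBlock (t : List Char) (L r : Nat)
    (hper : ∀ m, m < r + L → t[m]? = t[m % L]?) (j : Nat) (hj : j * L ≤ r) :
    (t.drop (j * L)).take L = t.take L := by
  apply List.ext_getElem?
  intro i
  rw [List.getElem?_take, List.getElem?_take]
  by_cases hi : i < L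
  · rw [if_pos hi, if_pos hi, List.getElem?_drop,
        hper (j * L + i) (by nlinarith), Nat.mul_comm j L, Nat.mul_add_mod_self_left,
        Nat.mod_eq_of_lt hi]
  · rw [if_neg hi, if_neg hi]

lemma pvAStrip_step (t p : List Char) (L pos : Nat) (hp : p ≠ [])
    (heq : (t.drop pos).take L = p) :
    pvAStrip t p L pos = pvAStrip t p L (pos + L) := by
  rw [pvAStrip, dif_pos ⟨hp, by rw [PySem.List.slice_natCast_add]; exact heq⟩]

lemma pvAStrip_stop (t p : List Char) (L pos : Nat) (hne : (t.drop pos).take L ≠ p) :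
    pvAStrip t p L pos = pos := by
  rw [pvAStrip, dif_neg]
  intro hc
  rw [PySem.List.slice_natCast_add] at hc
  exact hne hc.2

lemma pvAStrip_eq (t : List Char) (L r : Nat) (hL : 1 ≤ L) (hr : L ≤ r)
    (hext : ∀ i, i < r → pvCond t L i) (hstop : ¬ pvCond t L r) :
    pvAStrip t (t.take L) L 0 = (r / L + 1) * L := by
  have hn : r + L ≤ t.length := by
    have := (hext (r - 1) (by omega)).1
    omega
  have hper := pvPeriod t L r hL hext
  have hkL : r / L * L + r % L = r := by
    rw [Nat.mul_comm]; exact Nat.div_add_mod r L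
  have hmlt : r % L < L := Nat.mod_lt r (by omega)
  have hp : t.take L ≠ [] := by
    rw [Ne, List.take_eq_nil_iff]
    rintro (h | h)
    · omega
    · rw [h] at hn; simp at hn; omega
  have hstop' : (t.drop ((r / L + 1) * L)).take L ≠ t.take L := by
    by_cases hend : r + L = t.length
    · intro heq
      have hlen := congrArg List.length heq
      simp only [List.length_take, List.length_drop] at hlen
      rw [show (r / L + 1) * L = r / L * L + L by ring] at hlen
      omega
    · have hlt : r + L < t.length := by omega
      have hne2 : t[r]? ≠ t[r + L]? := fun hc => hstop ⟨hlt, hc⟩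
      intro heq
      have h1 := congrArg (fun l => l[r % L]?) heq
      simp only [List.getElem?_take, List.getElem?_drop, if_pos hmlt] at h1
      rw [show (r / L + 1) * L + r % L = r + L by
            rw [show (r / L + 1) * L = r / L * L + L by ring]; omega] at h1
      have h2 := hper r (by omega)
      exact hne2 (by rw [h2, ← h1])
  suffices hS : ∀ d j, j + d = r / L + 1 → pvAStrip t (t.take L) L (j * L) = (r / L + 1) * L by
    simpa using hS (r / L + 1) 0 (by omega)
  intro d
  induction d with
  | zero =>
    intro j hj
    have hj' : j = r / L + 1 := by omega
    subst hj'
    exact pvAStrip_stop t (t.take L) L _ hstop'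
  | succ d ih =>
    intro j hj
    have hjr : j * L ≤ r := by
      calc j * L ≤ r / L * L := Nat.mul_le_mul_right L (by omega)
        _ ≤ r := by omega
    rw [pvAStrip_step t (t.take L) L (j * L) hp (pvBlock t L r hper j hjr),
        show j * L + L = (j + 1) * L by ring]
    exact ih (j + 1) (by omega)

lemma pvAccept_iff (t : List Char) (L : Nat) (hL : 1 ≤ L) (hL2 : L ≤ t.length / 2) :
    PySem.Chars.startswith t (t.take L ++ t.take L) = true ↔ L ≤ pvBExt t L 0 := by
  obtain ⟨-, hext, hstop⟩ := pvBExt_spec t L 0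
  have hLn : L ≤ t.length := le_trans hL2 (Nat.div_le_self _ _)
  have hplen : (t.take L).length = L := by rw [List.length_take]; omega
  rw [PySem.Chars.startswith_iff]
  constructor
  · intro h
    by_contra hr
    have hr' : pvBExt t L 0 < L := Nat.lt_of_not_le hr
    set r := pvBExt t L 0 with hrd
    have h2L : L + L ≤ t.length := by
      have := h.length_le
      rw [List.length_append, hplen] at this
      omega
    set p := List.take L t with hpdef
    obtain ⟨s, hs⟩ := h
    apply hstop
    constructor
    · omega
    · have e1 : t[r]? = p[r]? := by
        rw [← hs, List.getElem?_append_left (by rw [List.length_append, hplen]; omega),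
            List.getElem?_append_left (by rw [hplen]; omega)]
      have e2 : t[r + L]? = p[r]? := by
        rw [← hs, List.getElem?_append_left (by rw [List.length_append, hplen]; omega),
            List.getElem?_append_right (by rw [hplen]; omega), hplen, Nat.add_sub_cancel]
      rw [e1, e2]
  · intro hLr
    have h2L : L + L ≤ t.length := by
      have := (hext (pvBExt t L 0 - 1) (by omega) (by omega)).1
      omega
    have hlen : (t.take L ++ t.take L).length = L + L := by
      rw [List.length_append, hplen]
    rw [List.prefix_iff_eq_take, hlen]
    apply List.ext_getElem?
    intro m
    rw [List.getElem?_take]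
    by_cases hm : m < L + L
    · rw [if_pos hm]
      by_cases hmL : m < L
      · rw [List.getElem?_append_left (by omega), List.getElem?_take, if_pos hmL]
      · rw [List.getElem?_append_right (by rw [hplen]; omega), hplen,
            List.getElem?_take, if_pos (by omega : m - L < L)]
        have hc := (hext (m - L) (by omega) (by omega)).2
        rw [Nat.sub_add_cancel (by omega)] at hc
        exact hc
    · rw [if_neg hm, List.getElem?_eq_none_iff.mpr (by rw [hlen]; omega)]

lemma pvSearch_eq (t : List Char) (L : Nat) (hL : 1 ≤ L) :
    pvASearch t L = pvBSearch t L := by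
  by_cases hcase : L < t.length / 2 + 1
  · rw [pvASearch, pvBSearch, dif_pos hcase, dif_pos hcase]
    have hL2 : L ≤ t.length / 2 := by omega
    simp only [PySem.List.slice_to_natCast]
    obtain ⟨-, hext, hstop⟩ := pvBExt_spec t L 0
    by_cases hacc : L ≤ pvBExt t L 0
    · rw [if_pos ((pvAccept_iff t L hL hL2).mpr hacc), if_pos hacc]
      rw [pvAStrip_eq t L (pvBExt t L 0) hL hacc (fun i hi => hext i (by omega) hi) hstop]
      rw [show (((pvBExt t L 0 / L + 1) * L : Nat) : Int) - (L : Int)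
            = ((pvBExt t L 0 / L * L : Nat) : Int) by push_cast; ring]
    · rw [if_neg (fun hc => hacc ((pvAccept_iff t L hL hL2).mp hc)), if_neg hacc]
      exact pvSearch_eq t (L + 1) (by omega)
  · rw [pvASearch, pvBSearch, dif_neg hcase, dif_neg hcase]
termination_by t.length / 2 + 1 - L

lemma pvMain (text : String) : remove_duplicate_prefixes text = remove_duplicate_prefixes_alt text := by
  unfold remove_duplicate_prefixes remove_duplicate_prefixes_alt
  simp only [PySem.Chars.len_eq]
  by_cases h4 : text.toList.length < 4
  · rw [if_pos (by exact_mod_cast h4), pvBSearch, dif_neg (by omega), String.ofList_toList]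
  · rw [if_neg (show ¬((text.toList.length : Int) < 4) by omega),
        pvSearch_eq text.toList 2 (by omega)]

-- ===== VERDICT (by name: the statement is the Claim_ definition above) =====
theorem remove_duplicate_prefixes_spec : Claim_equal_remove_duplicate_prefixes := by
  intro text _
  exact pvMain text
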